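-- pv_equiv track=rewrite | github.com/cyphou/InformaticaToFabric | run_dbt_migration.py | _expand_decode
-- ===== SOURCE A (Python) =====
-- def _expand_decode(sql):
--     """Expand _DECODE_(...) placeholders to CASE WHEN expressions.
--
--     Handles: DECODE(expr, val1, result1, val2, result2, ..., default)
--     Converts to: CASE expr WHEN val1 THEN result1 WHEN val2 THEN result2 ... ELSE default END
--     """
--     result = []
--     i = 0
--     while i < len(sql):
--         pos = sql.find('_DECODE_(', i)
--         if pos == -1:
--             result.append(sql[i:])
--             break
--         result.append(sql[i:pos])
--         # Find matching closing paren, respecting nesting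
--         depth = 0
--         start = pos + len('_DECODE_(')
--         j = start
--         while j < len(sql):
--             if sql[j] == '(':
--                 depth += 1
--             elif sql[j] == ')':
--                 if depth == 0:
--                     break
--                 depth -= 1
--             j += 1
--         if j >= len(sql):
--             # No matching paren — leave as-is
--             result.append(sql[pos:])
--             break
--         inner = sql[start:j]
--         # Split args on top-level commas (respecting parens)
--         args = _split_decode_args(inner)
--         if len(args) >= 3:
--             expr = args[0].strip()
--             case_parts = [f"CASE {expr}"]
--             k = 1
--             while k + 1 < len(args):
--                 case_parts.append(f" WHEN {args[k].strip()} THEN {args[k+1].strip()}")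
--                 k += 2
--             if k < len(args):
--                 # Odd remaining arg is the default
--                 case_parts.append(f" ELSE {args[k].strip()}")
--             case_parts.append(" END")
--             result.append("".join(case_parts))
--         else:
--             # Too few args — pass through
--             result.append(f"DECODE({inner})")
--         i = j + 1
--     return "".join(result)
--
-- def _split_decode_args(s):
--     """Split a DECODE argument string on top-level commas."""
--     args = []
--     depth = 0
--     current = []
--     for ch in s:
--         if ch == '(':
--             depth += 1
--             current.append(ch)
--         elif ch == ')':
--             depth -= 1
--             current.append(ch)
--         elif ch == ',' and depth == 0:
--             args.append("".join(current))
--             current = []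
--         else:
--             current.append(ch)
--     if current:
--         args.append("".join(current))
--     return args
-- ===== SOURCE B (Python) =====
-- def _expand_decode(sql):
--     """Expand _DECODE_(...) placeholders to CASE WHEN expressions.
--
--     Single-pass parser: one scan that, inside a _DECODE_( call, tracks paren
--     depth, splits on top-level commas and finds the closing paren at once.
--     """
--     out = []
--     i = 0
--     n = len(sql)
--     while i < n:
--         if sql.startswith('_DECODE_(', i):
--             k = i + 9
--             depth = 0
--             args = []
--             cur = []
--             raw = []
--             end = -1
--             while k < n:
--                 ch = sql[k]
--                 if ch == '(':
--                     depth += 1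
--                     cur.append(ch)
--                     raw.append(ch)
--                 elif ch == ')':
--                     if depth == 0:
--                         end = k
--                         break
--                     depth -= 1
--                     cur.append(ch)
--                     raw.append(ch)
--                 elif ch == ',' and depth == 0:
--                     args.append(''.join(cur))
--                     cur = []
--                     raw.append(ch)
--                 else:
--                     cur.append(ch)
--                     raw.append(ch)
--                 k += 1
--             if end == -1:
--                 out.append(sql[i:])
--                 break
--             if cur:
--                 args.append(''.join(cur))
--             if len(args) >= 3:
--                 parts = ['CASE ' + args[0].strip()]
--                 rest = args[1:]
--                 while len(rest) >= 2:
--                     parts.append(f" WHEN {rest[0].strip()} THEN {rest[1].strip()}")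
--                     rest = rest[2:]
--                 if rest:
--                     parts.append(f" ELSE {rest[0].strip()}")
--                 parts.append(' END')
--                 out.append(''.join(parts))
--             else:
--                 out.append('DECODE(' + ''.join(raw) + ')')
--             i = end + 1
--         else:
--             out.append(sql[i])
--             i += 1
--     return ''.join(out)
-- ===== Notes on version B (the rewrite author's own statement) =====
-- stated objective: alternative
-- what changed: Replaced A's three-phase processing per placeholder (scan for the matching closing paren, slice out the inner text, then re-scan that slice with _split_decode_args) by a single-pass parser whose one loop over the characters after the placeholder token simultaneously tracks paren depth, splits arguments on top-level commas and detects the depth-0 closing paren, so the separate argument-splitting pass disappears.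
import Mathlib
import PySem

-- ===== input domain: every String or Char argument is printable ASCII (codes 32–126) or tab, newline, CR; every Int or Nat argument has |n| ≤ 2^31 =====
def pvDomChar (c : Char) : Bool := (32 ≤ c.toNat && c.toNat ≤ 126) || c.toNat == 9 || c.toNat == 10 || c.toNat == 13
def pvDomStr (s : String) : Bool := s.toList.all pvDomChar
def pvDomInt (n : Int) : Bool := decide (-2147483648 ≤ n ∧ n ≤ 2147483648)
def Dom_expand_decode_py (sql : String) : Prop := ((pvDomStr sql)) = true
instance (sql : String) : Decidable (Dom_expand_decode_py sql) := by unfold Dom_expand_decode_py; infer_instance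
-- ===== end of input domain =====

-- B is an alternative single-pass parser: one scan finds the closing paren and splits the
-- arguments at once (no separate matching-paren pass followed by _split_decode_args).

-- the literal '_DECODE_(' both Pythons contain
def pvDecodeTok : List Char := "_DECODE_(".toList

-- ===== PORT A =====

-- port of `sql.find('_DECODE_(', i)` together with the slices sql[i:pos] and sql[pos:],
-- fused at list level (exact): none = find returned -1
def findDecA : List Char → Option (List Char × List Char)
  | [] => none
  | c :: cs =>
    if pvDecodeTok.isPrefixOf (c :: cs) then some ([], c :: cs)
    else match findDecA cs with
      | none => none
      | some (p, s) => some (c :: p, s)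

-- port of A's matching-paren while loop together with the slices inner = sql[start:j]
-- and the remainder sql[j+1:] (exact): none = j ran off the end
def scanCloseA : List Char → Nat → Option (List Char × List Char)
  | [], _ => none
  | c :: cs, depth =>
    if c = '(' then (scanCloseA cs (depth + 1)).map (fun p => (c :: p.1, p.2))
    else if c = ')' then
      if depth = 0 then some ([], cs)
      else (scanCloseA cs (depth - 1)).map (fun p => (c :: p.1, p.2))
    else (scanCloseA cs depth).map (fun p => (c :: p.1, p.2))

-- one step of _split_decode_args's for-loop; state = (args, current, depth)
def splitStepA (st : List (List Char) × List Char × Int) (ch : Char) : List (List Char) × List Char × Int :=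
  if ch = '(' then (st.1, st.2.1 ++ [ch], st.2.2 + 1)
  else if ch = ')' then (st.1, st.2.1 ++ [ch], st.2.2 - 1)
  else if ch = ',' ∧ st.2.2 = 0 then (st.1 ++ [st.2.1], [], st.2.2)
  else (st.1, st.2.1 ++ [ch], st.2.2)

-- port of _split_decode_args
def splitArgsA (s : List Char) : List (List Char) :=
  let st := s.foldl splitStepA ([], [], 0)
  if st.2.1 = [] then st.1 else st.1 ++ [st.2.1]

-- port of A's `while k + 1 < len(args)` case-building loop (index form), joined
def caseLoopA (args : List (List Char)) (k : Nat) : List Char :=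
  if k + 1 < args.length then
    (" WHEN ".toList ++ PySem.Chars.strip (args.getD k []) ++ " THEN ".toList
      ++ PySem.Chars.strip (args.getD (k + 1) [])) ++ caseLoopA args (k + 2)
  else if k < args.length then " ELSE ".toList ++ PySem.Chars.strip (args.getD k [])
  else []
  termination_by args.length - k

theorem scanCloseA_eq (s : List Char) (d : Nat) (inner rem : List Char)
    (h : scanCloseA s d = some (inner, rem)) : s = inner ++ ')' :: rem := by
  induction s generalizing d inner rem with
  | nil => simp [scanCloseA] at h
  | cons c cs ih =>
    simp only [scanCloseA] at h
    split_ifs at h with h1 h2 h3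
    · cases e : scanCloseA cs (d + 1) with
      | none => rw [e] at h; simp at h
      | some p =>
        rw [e] at h; simp at h
        obtain ⟨h4, h5⟩ := h
        subst h1; rw [← h4, ← h5]; simpa using ih _ _ _ e
    · simp at h; obtain ⟨h4, h5⟩ := h; subst h2 h4 h5; simp
    · cases e : scanCloseA cs (d - 1) with
      | none => rw [e] at h; simp at h
      | some p =>
        rw [e] at h; simp at h
        obtain ⟨h4, h5⟩ := h
        subst h2; rw [← h4, ← h5]; simpa using ih _ _ _ e
    · cases e : scanCloseA cs d with
      | none => rw [e] at h; simp at h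
      | some p =>
        rw [e] at h; simp at h
        obtain ⟨h4, h5⟩ := h
        rw [← h4, ← h5]; simpa using ih _ _ _ e

theorem findDecA_eq (s : List Char) (pre at_ : List Char)
    (h : findDecA s = some (pre, at_)) : s = pre ++ at_ ∧ pvDecodeTok.isPrefixOf at_ = true := by
  induction s generalizing pre at_ with
  | nil => simp [findDecA] at h
  | cons c cs ih =>
    simp only [findDecA] at h
    split_ifs at h with h1
    · simp at h; obtain ⟨h2, h3⟩ := h; subst h2; subst h3; exact ⟨rfl, h1⟩
    · cases e : findDecA cs with
      | none => rw [e] at h; simp at h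
      | some p =>
        rw [e] at h; simp at h
        obtain ⟨h2, h3⟩ := h
        obtain ⟨e1, e2⟩ := ih _ _ e
        subst h3; rw [← h2]; exact ⟨by rw [e1]; simp, e2⟩

theorem scanCloseA_len (s : List Char) (d : Nat) (inner rem : List Char)
    (h : scanCloseA s d = some (inner, rem)) : rem.length < s.length := by
  have := scanCloseA_eq s d inner rem h
  subst this; simp; omega

-- port of A's outer while loop (state rest = sql[i:])
def outerA (rest : List Char) : List Char :=
  match hf : findDecA rest with
  | none => rest
  | some (pre, atPos) =>
    match hs : scanCloseA (atPos.drop 9) 0 with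
    | none => pre ++ atPos
    | some (inner, rem) =>
      let args := splitArgsA inner
      pre ++ (if 3 ≤ args.length then
          "CASE ".toList ++ PySem.Chars.strip (args.getD 0 []) ++ caseLoopA args 1 ++ " END".toList
        else "DECODE(".toList ++ inner ++ [')']) ++ outerA rem
  termination_by rest.length
  decreasing_by
    have h1 := findDecA_eq rest pre atPos hf
    have h2 := scanCloseA_len _ _ _ _ hs
    obtain ⟨he, hp⟩ := h1
    have h9 : 9 ≤ atPos.length := by
      have := List.IsPrefix.length_le (List.isPrefixOf_iff_prefix.mp hp)
      simpa [pvDecodeTok] using this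
    subst he
    simp at h2 ⊢
    omega

def expand_decode_py (sql : String) : String := String.mk (outerA sql.toList)

-- ===== PORT B =====

-- B's inner loop: single pass tracking depth, current arg, raw inner and args at once;
-- returns (args, raw inner, remainder after the closing paren); none = unterminated
def parseArgsB : List Char → Nat → List Char → List Char → List (List Char) →
    Option (List (List Char) × List Char × List Char)
  | [], _, _, _, _ => none
  | c :: cs, depth, cur, raw, args =>
    if c = '(' then parseArgsB cs (depth + 1) (cur ++ [c]) (raw ++ [c]) args
    else if c = ')' then
      if depth = 0 then some ((if cur = [] then args else args ++ [cur]), raw, cs)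
      else parseArgsB cs (depth - 1) (cur ++ [c]) (raw ++ [c]) args
    else if c = ',' ∧ depth = 0 then parseArgsB cs 0 [] (raw ++ [c]) (args ++ [cur])
    else parseArgsB cs depth (cur ++ [c]) (raw ++ [c]) args

-- B's WHEN/THEN builder: structural recursion over the remaining args (rest = rest[2:])
def pairsB : List (List Char) → List Char
  | v :: r :: rest =>
    " WHEN ".toList ++ PySem.Chars.strip v ++ " THEN ".toList ++ PySem.Chars.strip r ++ pairsB rest
  | [d] => " ELSE ".toList ++ PySem.Chars.strip d
  | [] => []

theorem parseArgsB_len (s : List Char) (d : Nat) (cur raw : List Char) (args : List (List Char))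
    (out : List (List Char) × List Char × List Char)
    (h : parseArgsB s d cur raw args = some out) : out.2.2.length < s.length := by
  induction s generalizing d cur raw args with
  | nil => simp [parseArgsB] at h
  | cons c cs ih =>
    simp only [parseArgsB] at h
    split_ifs at h with h1 h2 h3 h4 h5
    · have := ih _ _ _ _ h; simp; omega
    · simp only [Option.some.injEq] at h; subst h; simp
    · simp only [Option.some.injEq] at h; subst h; simp
    · have := ih _ _ _ _ h; simp; omega
    · have := ih _ _ _ _ h; simp; omega
    · have := ih _ _ _ _ h; simp; omega

-- B's `if len(args) >= 3` replacement block: CASE/WHEN build or DECODE passthrough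
def buildB (args : List (List Char)) (raw : List Char) : List Char :=
  match args with
  | a :: b :: c' :: t =>
    "CASE ".toList ++ PySem.Chars.strip a ++ pairsB (b :: c' :: t) ++ " END".toList
  | _ => "DECODE(".toList ++ raw ++ [')']

-- B's single outer scan
def scanB (s : List Char) : List Char :=
  match s with
  | [] => []
  | c :: cs =>
    if pvDecodeTok.isPrefixOf (c :: cs) then
      match hp : parseArgsB ((c :: cs).drop 9) 0 [] [] [] with
      | none => c :: cs
      | some (args, raw, rem) => buildB args raw ++ scanB rem
    else c :: scanB cs
  termination_by s.length
  decreasing_by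
    · have := parseArgsB_len _ _ _ _ _ _ hp
      simp at this ⊢
      omega
    · simp

def expand_decode_py_alt (sql : String) : String := String.mk (scanB sql.toList)

-- ===== PRECONDITION & SPEC =====
def Spec_expand_decode_py (sql : String) (out : String) : Prop := out = expand_decode_py_alt sql
instance (sql : String) (out : String) : Decidable (Spec_expand_decode_py sql out) := by unfold Spec_expand_decode_py; infer_instance

-- ===== CLAIM (what is proved, stated in full; the proofs are below) =====
def Claim_equal_expand_decode_py : Prop := ∀ (sql : String), Dom_expand_decode_py sql → Spec_expand_decode_py sql (expand_decode_py sql)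

-- ===== LEMMAS AND PROOFS =====

theorem caseLoopA_eq_pairsB (args : List (List Char)) (k : Nat) :
    caseLoopA args k = pairsB (args.drop k) := by
  have key : ∀ (m k : Nat), args.length - k ≤ m → caseLoopA args k = pairsB (args.drop k) := by
    intro m
    induction m with
    | zero =>
      intro k hk
      rw [caseLoopA, List.drop_eq_nil_of_le (by omega)]
      simp [pairsB, show ¬ (k + 1 < args.length) by omega, show ¬ (k < args.length) by omega]
    | succ m ih =>
      intro k hk
      rw [caseLoopA]
      by_cases h1 : k + 1 < args.length
      · have hd : args.drop k = args[k] :: args[k+1] :: args.drop (k+2) := by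
          rw [List.drop_eq_getElem_cons (by omega), List.drop_eq_getElem_cons (by omega)]
        rw [hd]
        simp only [h1, if_pos, pairsB,
          List.getD_eq_getElem args [] (by omega : k < args.length),
          List.getD_eq_getElem args [] (by omega : k + 1 < args.length)]
        rw [ih (k+2) (by omega)]
      · by_cases h2 : k < args.length
        · have hd : args.drop k = [args[k]] := by
            rw [List.drop_eq_getElem_cons (by omega), List.drop_eq_nil_of_le (by omega)]
          rw [hd]
          simp only [h1, h2, if_neg, if_pos, pairsB, not_false_iff,
            List.getD_eq_getElem args [] (by omega : k < args.length)]
        · rw [List.drop_eq_nil_of_le (by omega)]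
          simp [pairsB, h1, h2]
  exact key (args.length - k) k (le_refl _)

theorem parseArgsB_eq (s : List Char) (d : Nat) (cur raw : List Char) (args : List (List Char)) :
    parseArgsB s d cur raw args =
      (scanCloseA s d).map (fun p =>
        (let st := p.1.foldl splitStepA (args, cur, (d : Int))
         ((if st.2.1 = [] then st.1 else st.1 ++ [st.2.1]), raw ++ p.1, p.2))) := by
  induction s generalizing d cur raw args with
  | nil => simp [parseArgsB, scanCloseA]
  | cons c cs ih =>
    by_cases h1 : c = '('
    · subst h1
      rw [show parseArgsB ('(' :: cs) d cur raw args
            = parseArgsB cs (d + 1) (cur ++ ['(']) (raw ++ ['(']) args from by simp [parseArgsB]]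
      rw [ih]
      cases e : scanCloseA cs (d + 1) with
      | none => simp [scanCloseA, e]
      | some p => simp [scanCloseA, e, splitStepA]
    · by_cases h2 : c = ')'
      · subst h2
        by_cases h3 : d = 0
        · subst h3
          simp [parseArgsB, scanCloseA]
        · rw [show parseArgsB (')' :: cs) d cur raw args
                = parseArgsB cs (d - 1) (cur ++ [')']) (raw ++ [')']) args from by
              simp [parseArgsB, h3]]
          rw [ih]
          have hc : ((d - 1 : Nat) : Int) = (d : Int) - 1 := by omega
          cases e : scanCloseA cs (d - 1) with
          | none => simp [scanCloseA, e, h3]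
          | some p => simp [scanCloseA, e, h3, splitStepA, hc]
      · by_cases h4 : c = ',' ∧ d = 0
        · obtain ⟨h4c, h4d⟩ := h4
          subst h4c; subst h4d
          rw [show parseArgsB (',' :: cs) 0 cur raw args
                = parseArgsB cs 0 [] (raw ++ [',']) (args ++ [cur]) from by
              simp [parseArgsB, h2]]
          rw [ih]
          cases e : scanCloseA cs 0 with
          | none => simp [scanCloseA, e, h1, h2]
          | some p => simp [scanCloseA, e, h1, h2, splitStepA]
        · rw [show parseArgsB (c :: cs) d cur raw args
                = parseArgsB cs d (cur ++ [c]) (raw ++ [c]) args from by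
              simp only [parseArgsB, if_neg h1, if_neg h2, if_neg h4]]
          rw [ih]
          cases e : scanCloseA cs d with
          | none => simp [scanCloseA, e, h1, h2]
          | some p => simp [scanCloseA, e, h1, h2, splitStepA, h4]

theorem outerA_cons_not_prefix (c : Char) (cs : List Char)
    (hp : ¬ pvDecodeTok.isPrefixOf (c :: cs) = true) :
    outerA (c :: cs) = c :: outerA cs := by
  rw [outerA, outerA]
  cases e : findDecA cs with
  | none =>
    rw [show findDecA (c :: cs) = none from by simp [findDecA, hp, e]]
  | some p =>
    obtain ⟨pre, atPos⟩ := p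
    rw [show findDecA (c :: cs) = some (c :: pre, atPos) from by simp [findDecA, hp, e]]
    split
    next heq => simp at heq
    next inn rm heq =>
      simp only [Option.some.injEq, Prod.mk.injEq] at heq
      obtain ⟨hq1, hq2⟩ := heq
      subst hq1; subst hq2
      split <;> simp

theorem outerA_eq_scanB (s : List Char) : outerA s = scanB s := by
  have key : ∀ (n : Nat) (s : List Char), s.length ≤ n → outerA s = scanB s := by
    intro n
    induction n with
    | zero =>
      intro s hs
      have : s = [] := by cases s <;> simp_all
      subst this
      rw [outerA, scanB]
      simp [findDecA]
    | succ n ih =>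
      intro s hs
      cases s with
      | nil => rw [outerA, scanB]; simp [findDecA]
      | cons c cs =>
        by_cases hp : pvDecodeTok.isPrefixOf (c :: cs) = true
        · rw [outerA, scanB]
          rw [show findDecA (c :: cs) = some ([], c :: cs) from by simp [findDecA, hp]]
          rw [if_pos hp]
          have hb := parseArgsB_eq ((c :: cs).drop 9) 0 [] [] []
          split
          next e0 => simp at e0
          next pre0 at0 e0 =>
            simp only [Option.some.injEq, Prod.mk.injEq] at e0
            obtain ⟨e0a, e0b⟩ := e0
            subst e0a; subst e0b
            split
            next e =>
              rw [e] at hb; simp only [Option.map_none] at hb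
              split
              next => simp
              next args raw rem2 e2 => rw [hb] at e2; simp at e2
            next inner rem e =>
              rw [e] at hb; simp only [Option.map_some] at hb
              have hrem : rem.length ≤ n := by
                have h2 := scanCloseA_len _ _ _ _ e
                simp at h2 hs
                omega
              have hIH := ih rem hrem
              split
              next e2 => rw [hb] at e2; simp at e2
              next args raw rem2 e2 =>
                rw [hb] at e2
                simp only [Option.some.injEq, Prod.mk.injEq, Nat.cast_zero] at e2
                obtain ⟨hargs0, hraw, hrem2⟩ := e2
                have hargs1 : args = splitArgsA inner := by
                  rw [← hargs0]; simp [splitArgsA]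
                subst hargs1; subst hraw; subst hrem2
                cases hargs : splitArgsA inner with
                | nil => simp [hIH, buildB]
                | cons a t1 =>
                  cases t1 with
                  | nil => simp [hIH, buildB]
                  | cons b t2 =>
                    cases t2 with
                    | nil => simp [hIH, buildB]
                    | cons c' t3 =>
                      simp [hIH, buildB, caseLoopA_eq_pairsB,
                        show (3:Nat) ≤ t3.length + 3 by omega]
        · rw [outerA_cons_not_prefix c cs hp, scanB]
          simp only [hp, if_neg, Bool.false_eq_true, not_false_iff]
          rw [ih cs (by simp at hs; omega)]
  exact key s.length s (le_refl _)

-- ===== VERDICT (by name: the statement is the Claim_ definition above) =====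
theorem expand_decode_py_spec : Claim_equal_expand_decode_py := by
  intro sql _
  unfold Spec_expand_decode_py expand_decode_py expand_decode_py_alt
  rw [outerA_eq_scanB]
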